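-- pv_equiv track=rewrite | github.com/MoesBigRepo/credify-audit-engine | scripts/strategize.py | _pick_primary_per_bureau
-- ===== SOURCE A (Python) =====
-- def _pick_primary_per_bureau(raw_scores):
--     """Select one primary score per bureau. Prefer FICO Score 8, then first available."""
--     by_bureau = {}
--     for s in raw_scores:
--         bureau = s.get("bureau", "Unknown")
--         model = s.get("model", "")
--         if bureau not in by_bureau:
--             by_bureau[bureau] = s
--         elif "score 8" in model.lower() and "score 8" not in by_bureau[bureau].get("model", "").lower():
--             by_bureau[bureau] = s
--     return list(by_bureau.values())
-- ===== SOURCE B (Python) =====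
-- def _pick_primary_per_bureau(raw_scores):
--     """Select one primary score per bureau. Prefer FICO Score 8, then first available."""
--     groups = {}
--     for s in raw_scores:
--         groups.setdefault(s.get("bureau", "Unknown"), []).append(s)
--     result = []
--     for scores in groups.values():
--         chosen = scores[0]
--         for s in scores:
--             if "score 8" in s.get("model", "").lower():
--                 chosen = s
--                 break
--         result.append(chosen)
--     return result
-- ===== Notes on version B (the rewrite author's own statement) =====
-- stated objective: simpler
-- what changed: A does a single pass with a conditional running-replacement dict of bureau->score; B first groups scores by bureau, then for each group independently selects the first 'score 8' model (else the first score), separating grouping from selection.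
import Mathlib
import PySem

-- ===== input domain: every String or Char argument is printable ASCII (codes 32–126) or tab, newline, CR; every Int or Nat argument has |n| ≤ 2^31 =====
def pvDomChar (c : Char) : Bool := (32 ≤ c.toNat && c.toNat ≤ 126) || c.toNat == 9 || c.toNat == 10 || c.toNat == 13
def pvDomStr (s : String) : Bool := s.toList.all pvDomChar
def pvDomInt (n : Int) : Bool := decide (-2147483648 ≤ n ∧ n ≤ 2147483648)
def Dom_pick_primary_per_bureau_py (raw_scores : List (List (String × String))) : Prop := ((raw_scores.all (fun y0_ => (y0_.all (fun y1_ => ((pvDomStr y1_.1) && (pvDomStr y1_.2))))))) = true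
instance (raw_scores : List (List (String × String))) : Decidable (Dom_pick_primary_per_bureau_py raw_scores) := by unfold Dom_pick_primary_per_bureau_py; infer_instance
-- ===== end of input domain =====

-- B separates A's single-pass running-replacement into group-by-bureau then per-group selection; objective: simpler decomposition, same O(n) cost.


-- shared primitive: Python's s.get(k, dflt) on a score record (dict → assoc list, first match)
def pyGetS (s : List (String × String)) (k dflt : String) : String :=
  (PySem.Dict.mk s).getD k dflt

-- ===== PORT A =====
def pick_primary_per_bureau_py (raw_scores : List (List (String × String))) : List (List (String × String)) :=
  (raw_scores.foldl
    (fun by_bureau s =>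
      let bureau := pyGetS s "bureau" "Unknown"
      let model := pyGetS s "model" ""
      if !(by_bureau.contains bureau) then
        by_bureau.insert bureau s
      else if PySem.Str.isIn "score 8" (PySem.Str.lower model)
              && !(PySem.Str.isIn "score 8" (PySem.Str.lower (pyGetS (by_bureau.getD bureau []) "model" ""))) then
        by_bureau.insert bureau s
      else
        by_bureau)
    PySem.Dict.empty).values

-- ===== PORT B =====
-- '"score 8" in s.get("model", "").lower()'
def hasScore8 (s : List (String × String)) : Bool :=
  PySem.Str.isIn "score 8" (PySem.Str.lower (pyGetS s "model" ""))

-- inner loop of B: chosen = scores[0]; first score-8 model wins, break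
def chooseScore (scores : List (List (String × String))) : List (String × String) :=
  match scores.find? hasScore8 with
  | some s => s
  | none => scores.headD []

def pick_primary_per_bureau_py_alt (raw_scores : List (List (String × String))) : List (List (String × String)) :=
  let groups := raw_scores.foldl
    (fun g s => g.modify (pyGetS s "bureau" "Unknown") [] (· ++ [s])) PySem.Dict.empty
  groups.items.map (fun p => chooseScore p.2)

-- ===== PRECONDITION & SPEC =====
def Spec_pick_primary_per_bureau_py (raw_scores : List (List (String × String))) (out : List (List (String × String))) : Prop := out = pick_primary_per_bureau_py_alt raw_scores
instance (raw_scores : List (List (String × String))) (out : List (List (String × String))) : Decidable (Spec_pick_primary_per_bureau_py raw_scores out) := by unfold Spec_pick_primary_per_bureau_py; infer_instance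

-- ===== CLAIM (what is proved, stated in full; the proofs are below) =====
def Claim_equal_pick_primary_per_bureau_py : Prop := ∀ (raw_scores : List (List (String × String))), Dom_pick_primary_per_bureau_py raw_scores → Spec_pick_primary_per_bureau_py raw_scores (pick_primary_per_bureau_py raw_scores)

-- ===== LEMMAS AND PROOFS =====

-- chooseScore of a one-element group is that element
theorem chooseScore_singleton (s : List (String × String)) : chooseScore [s] = s := by
  unfold chooseScore
  cases h : List.find? hasScore8 [s] with
  | none => rfl
  | some t =>
    simp [List.find?] at h
    split at h
    · exact (Option.some_inj.mp h).symm
    · exact absurd h (by simp)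

-- appending one score to a nonempty group updates the choice exactly as A's replacement rule does
theorem chooseScore_append_singleton (xs : List (List (String × String))) (hxs : xs ≠ [])
    (s : List (String × String)) :
    chooseScore (xs ++ [s]) =
      if hasScore8 s && !(hasScore8 (chooseScore xs)) then s else chooseScore xs := by
  unfold chooseScore
  rw [List.find?_append]
  cases h : List.find? hasScore8 xs with
  | some t =>
    have ht : hasScore8 t = true := List.find?_some h
    simp [ht]
  | none =>
    have hall : ∀ x ∈ xs, hasScore8 x = false := by
      intro x hx
      simpa using List.find?_eq_none.mp h x hx
    obtain ⟨a, tail, rfl⟩ := List.exists_cons_of_ne_nil hxs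
    have hha : hasScore8 a = false := hall a (by simp)
    cases hs : hasScore8 s with
    | true => simp [List.find?, hs, hha]
    | false => simp [List.find?, hs, hha]

-- lookup in a dict whose items are a value-mapped copy
theorem get?_mk_map {V W : Type} (l : List (String × V)) (f : V → W) (k : String) :
    (PySem.Dict.mk (l.map (fun p => (p.1, f p.2)))).get? k = ((PySem.Dict.mk l).get? k).map f := by
  induction l with
  | nil => simp [PySem.Dict.get?]
  | cons p rest ih =>
    obtain ⟨k', v⟩ := p
    simp only [List.map_cons, PySem.Dict.get?_mk_cons]
    by_cases h : k' = k
    · simp [h]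
    · simp [h, ih]

-- the step functions of the two ports
def stepA (d : PySem.Dict String (List (String × String))) (s : List (String × String)) :
    PySem.Dict String (List (String × String)) :=
  let bureau := pyGetS s "bureau" "Unknown"
  let model := pyGetS s "model" ""
  if !(d.contains bureau) then d.insert bureau s
  else if PySem.Str.isIn "score 8" (PySem.Str.lower model)
          && !(PySem.Str.isIn "score 8" (PySem.Str.lower (pyGetS (d.getD bureau []) "model" ""))) then
    d.insert bureau s
  else d

def stepB (g : PySem.Dict String (List (List (String × String)))) (s : List (String × String)) :
    PySem.Dict String (List (List (String × String))) :=
  g.modify (pyGetS s "bureau" "Unknown") [] (· ++ [s])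

-- the loop invariant: A's dict is the chooseScore-image of B's groups; groups are nonempty; keys stay unique
theorem fold_invariant (l : List (List (String × String)))
    (dA : PySem.Dict String (List (String × String)))
    (g : PySem.Dict String (List (List (String × String))))
    (hit : dA.items = g.items.map (fun p => (p.1, chooseScore p.2)))
    (hne : ∀ p ∈ g.items, p.2 ≠ [])
    (hnd : g.keys.Nodup) :
    (l.foldl stepA dA).items = ((l.foldl stepB g).items).map (fun p => (p.1, chooseScore p.2)) := by
  induction l generalizing dA g with
  | nil => simpa using hit
  | cons s rest ih =>
    simp only [List.foldl_cons]
    set b := pyGetS s "bureau" "Unknown" with hb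
    -- same keys, hence same `contains`
    have hkeys : dA.keys = g.keys := by
      simp [PySem.Dict.keys, hit]
    have hcont : dA.contains b = g.contains b := by
      simp [PySem.Dict.contains_eq_decide_mem_keys, hkeys]
    by_cases hc : g.contains b = true
    · -- bureau already present
      have hg : ∃ xs, g.get? b = some xs := by
        cases h : g.get? b with
        | none => rw [PySem.Dict.get?_eq_none_iff_contains] at h; simp [hc] at h
        | some xs => exact ⟨xs, rfl⟩
      obtain ⟨xs, hxs⟩ := hg
      have hmem : (b, xs) ∈ g.items := PySem.Dict.mem_items_of_get?_eq_some g hxs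
      have hxs_ne : xs ≠ [] := hne _ hmem
      have hgD : g.getD b [] = xs := PySem.Dict.getD_of_get?_eq_some g [] hxs
      have hdAget : dA.get? b = some (chooseScore xs) := by
        have := get?_mk_map g.items (fun v => chooseScore v) b
        cases dA with
        | mk ditems =>
          subst hit
          cases g with
          | mk gitems => simpa [hxs] using this
      have hdAD : dA.getD b [] = chooseScore xs := PySem.Dict.getD_of_get?_eq_some dA [] hdAget
      -- B's step: insert the extended group
      have hBstep : stepB g s = g.insert b (xs ++ [s]) := by
        simp only [stepB, PySem.Dict.modify, ← hb, hgD]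
      -- the replacement condition of A, in terms of hasScore8
      have hcond : (PySem.Str.isIn "score 8" (PySem.Str.lower (pyGetS s "model" ""))
          && !(PySem.Str.isIn "score 8" (PySem.Str.lower (pyGetS (dA.getD b []) "model" ""))))
          = (hasScore8 s && !(hasScore8 (chooseScore xs))) := by
        simp [hasScore8, hdAD]
      -- items of B's new groups, mapped through chooseScore
      have hBitems : (stepB g s).items.map (fun p => (p.1, chooseScore p.2))
          = g.items.map (fun p => if p.1 == b then (b, chooseScore (xs ++ [s])) else (p.1, chooseScore p.2)) := by
        rw [hBstep, PySem.Dict.items_insert_of_contains g _ hc, List.map_map]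
        apply List.map_congr_left
        intro p _
        by_cases hp : p.1 = b <;> simp [hp]
      have hchoose := chooseScore_append_singleton xs hxs_ne s
      -- entries at key b in g.items all equal (b, xs) thanks to Nodup keys
      have hentry : ∀ p ∈ g.items, p.1 = b → p.2 = xs := by
        intro p hp hpb
        have : g.get? p.1 = some p.2 := PySem.Dict.get?_of_mem_items g hp hnd
        rw [hpb, hxs] at this
        exact (Option.some_inj.mp this).symm
      have hA : stepA dA s = (if hasScore8 s && !(hasScore8 (chooseScore xs)) then dA.insert b s else dA) := by
        simp only [stepA, ← hb, hcont, hc, hcond]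
        simp
      rw [hA]
      apply ih
      · -- items relation after the step
        rw [hBitems]
        by_cases hrepl : (hasScore8 s && !(hasScore8 (chooseScore xs))) = true
        · have hcA : dA.contains b = true := by rw [hcont]; exact hc
          rw [if_pos hrepl, PySem.Dict.items_insert_of_contains dA _ hcA, hit, List.map_map]
          apply List.map_congr_left
          intro p hp
          by_cases hp1 : p.1 = b
          · have := hentry p hp hp1
            simp [hp1, hchoose, hrepl]
          · simp [hp1]
        · rw [if_neg hrepl, hit]
          apply List.map_congr_left
          intro p hp
          by_cases hp1 : p.1 = b
          · have := hentry p hp hp1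
            simp only [hp1, beq_self_eq_true, if_pos, this]
            rw [hchoose, if_neg hrepl]
          · simp [hp1]
      · -- groups stay nonempty
        intro p hp
        rw [hBstep] at hp
        rcases (PySem.Dict.mem_items_insert _ _ _ _).mp hp with h | ⟨h, _⟩
        · rw [h]; simp
        · exact hne _ h
      · -- keys stay Nodup
        rw [hBstep]; exact PySem.Dict.nodup_keys_insert _ _ _ hnd
    · -- new bureau
      have hc' : g.contains b = false := by simpa using hc
      have hcA : dA.contains b = false := by rw [hcont]; exact hc'
      have hBstep : stepB g s = g.insert b [s] := by
        simp only [stepB, PySem.Dict.modify, ← hb, PySem.Dict.getD_of_not_contains g _ hc']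
        rfl
      have hA : stepA dA s = dA.insert b s := by
        simp [stepA, ← hb, hcA]
      rw [hA, hBstep]
      apply ih
      · rw [PySem.Dict.items_insert_of_not_contains dA _ hcA,
            PySem.Dict.items_insert_of_not_contains g _ hc', hit]
        simp [chooseScore_singleton]
      · intro p hp
        rcases (PySem.Dict.mem_items_insert _ _ _ _).mp hp with h | ⟨h, _⟩
        · rw [h]; simp
        · exact hne _ h
      · exact PySem.Dict.nodup_keys_insert _ _ _ hnd

-- ===== VERDICT (by name: the statement is the Claim_ definition above) =====
theorem pick_primary_per_bureau_py_spec : Claim_equal_pick_primary_per_bureau_py := by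
  intro raw_scores _
  unfold Spec_pick_primary_per_bureau_py pick_primary_per_bureau_py pick_primary_per_bureau_py_alt
  have h := fold_invariant raw_scores PySem.Dict.empty PySem.Dict.empty (by rfl)
    (by intro p hp; simp [PySem.Dict.empty] at hp) (@PySem.Dict.nodup_keys_empty String (List (List (String × String))))
  simp only [PySem.Dict.values]
  rw [show (fun (by_bureau : PySem.Dict String (List (String × String))) s =>
        let bureau := pyGetS s "bureau" "Unknown"
        let model := pyGetS s "model" ""
        if !(by_bureau.contains bureau) then by_bureau.insert bureau s
        else if PySem.Str.isIn "score 8" (PySem.Str.lower model)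
                && !(PySem.Str.isIn "score 8" (PySem.Str.lower (pyGetS (by_bureau.getD bureau []) "model" ""))) then
          by_bureau.insert bureau s
        else by_bureau) = stepA from rfl,
      show (fun (g : PySem.Dict String (List (List (String × String)))) s =>
        g.modify (pyGetS s "bureau" "Unknown") [] (· ++ [s])) = stepB from rfl]
  rw [h, List.map_map]
  rfl
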